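-- pv_equiv track=rewrite | github.com/Wchoi189/upstageailab-ocr-recsys-competition-ocr-2 | scripts/audit/analyze_broken_imports_adt.py | analyze_internal_ocr_imports
-- ===== SOURCE A (Python) =====
-- from collections import defaultdict
-- from typing import Dict, List, Tuple
--
-- def analyze_internal_ocr_imports(imports: List[Dict]) -> Dict[str, List[Dict]]:
--     """Further categorize internal OCR imports."""
--     subcategories = defaultdict(list)
--
--     for item in imports:
--         module = item.get("module", "")
--
--         if "domains.detection.metrics" in module or "domains.recognition.metrics" in module:
--             subcategories["domain_metrics"].append(item)
--         elif "domains.detection.evaluation" in module: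
--             subcategories["domain_evaluation"].append(item)
--         elif "core.evaluation" in module:
--             subcategories["core_evaluation"].append(item)
--         elif "core.lightning" in module:
--             subcategories["lightning_utils"].append(item)
--         elif "core.models" in module:
--             subcategories["model_components"].append(item)
--         elif "core.validation" in module:
--             subcategories["validation"].append(item)
--         elif "core.utils.registry" in module:
--             subcategories["registry"].append(item)
--         else:
--             subcategories["other_internal"].append(item)
--
--     return dict(subcategories)
-- ===== SOURCE B (Python) =====
-- from typing import Dict, List
--
--
-- def _category(module: str) -> str:
--     if "domains.detection.metrics" in module or "domains.recognition.metrics" in module: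
--         return "domain_metrics"
--     if "domains.detection.evaluation" in module:
--         return "domain_evaluation"
--     if "core.evaluation" in module:
--         return "core_evaluation"
--     if "core.lightning" in module:
--         return "lightning_utils"
--     if "core.models" in module:
--         return "model_components"
--     if "core.validation" in module:
--         return "validation"
--     if "core.utils.registry" in module:
--         return "registry"
--     return "other_internal"
--
--
-- def analyze_internal_ocr_imports(imports: List[Dict]) -> Dict[str, List[Dict]]:
--     """Classify-then-group in staged passes: tag every item with its category,
--     dedup the tag sequence for the key order, then build each group by filtering."""
--     tagged = [(_category(item.get("module", "")), item) for item in imports]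
--     order = list(dict.fromkeys(cat for cat, _ in tagged))
--     return {cat: [item for c, item in tagged if c == cat] for cat in order}
-- ===== Notes on version B (the rewrite author's own statement) =====
-- stated objective: alternative
-- what changed: Replaces A's single-pass defaultdict accumulation with staged passes: tag each item with its category, dedup the tag sequence to get the key order, then build each group by filtering the tagged list.
import Mathlib
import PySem

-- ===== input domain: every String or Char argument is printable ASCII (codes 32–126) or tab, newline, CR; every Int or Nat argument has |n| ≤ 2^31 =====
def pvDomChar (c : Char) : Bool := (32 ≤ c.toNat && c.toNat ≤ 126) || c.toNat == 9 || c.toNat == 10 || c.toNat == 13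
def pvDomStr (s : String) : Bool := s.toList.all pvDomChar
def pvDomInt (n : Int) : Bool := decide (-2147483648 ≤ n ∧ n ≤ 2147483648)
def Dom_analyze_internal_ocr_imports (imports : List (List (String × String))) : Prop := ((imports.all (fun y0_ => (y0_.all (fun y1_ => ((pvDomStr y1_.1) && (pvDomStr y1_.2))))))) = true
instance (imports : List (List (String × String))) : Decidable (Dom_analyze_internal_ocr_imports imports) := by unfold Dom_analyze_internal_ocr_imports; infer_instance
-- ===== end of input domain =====

-- B replaces A's single-pass defaultdict accumulation with staged passes (tag items, dedup tags for key order, group by filtering); objective: alternative.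


-- ===== PORT A =====
def analyze_internal_ocr_imports (imports : List (List (String × String))) : List (String × List (List (String × String))) :=
  let subcategories :=
    imports.foldl (fun d item =>
      let module := (PySem.Dict.mk item).getD "module" ""
      if PySem.Str.isIn "domains.detection.metrics" module || PySem.Str.isIn "domains.recognition.metrics" module then
        d.modify "domain_metrics" [] (· ++ [item])
      else if PySem.Str.isIn "domains.detection.evaluation" module then
        d.modify "domain_evaluation" [] (· ++ [item])
      else if PySem.Str.isIn "core.evaluation" module then
        d.modify "core_evaluation" [] (· ++ [item])
      else if PySem.Str.isIn "core.lightning" module then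
        d.modify "lightning_utils" [] (· ++ [item])
      else if PySem.Str.isIn "core.models" module then
        d.modify "model_components" [] (· ++ [item])
      else if PySem.Str.isIn "core.validation" module then
        d.modify "validation" [] (· ++ [item])
      else if PySem.Str.isIn "core.utils.registry" module then
        d.modify "registry" [] (· ++ [item])
      else
        d.modify "other_internal" [] (· ++ [item])) PySem.Dict.empty
  subcategories.items

-- ===== PORT B =====
-- B-side helper: the category of one module string (Source B's _category)
def pvCategory (module : String) : String :=
  if PySem.Str.isIn "domains.detection.metrics" module || PySem.Str.isIn "domains.recognition.metrics" module then
    "domain_metrics"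
  else if PySem.Str.isIn "domains.detection.evaluation" module then
    "domain_evaluation"
  else if PySem.Str.isIn "core.evaluation" module then
    "core_evaluation"
  else if PySem.Str.isIn "core.lightning" module then
    "lightning_utils"
  else if PySem.Str.isIn "core.models" module then
    "model_components"
  else if PySem.Str.isIn "core.validation" module then
    "validation"
  else if PySem.Str.isIn "core.utils.registry" module then
    "registry"
  else
    "other_internal"

def analyze_internal_ocr_imports_alt (imports : List (List (String × String))) : List (String × List (List (String × String))) :=
  let tagged := imports.map (fun item => (pvCategory ((PySem.Dict.mk item).getD "module" ""), item))
  -- list(dict.fromkeys(...)) = first occurrences in order = PySem.List.dedup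
  let order := PySem.List.dedup (tagged.map (fun p => p.1))
  -- dict comprehension over the (distinct) keys of `order`, each value built by filtering the tagged list
  order.map (fun cat => (cat, (tagged.filter (fun p => p.1 == cat)).map (fun p => p.2)))

-- ===== PRECONDITION & SPEC =====
def Spec_analyze_internal_ocr_imports (imports : List (List (String × String))) (out : List (String × List (List (String × String)))) : Prop := out = analyze_internal_ocr_imports_alt imports
instance (imports : List (List (String × String))) (out : List (String × List (List (String × String)))) : Decidable (Spec_analyze_internal_ocr_imports imports out) := by unfold Spec_analyze_internal_ocr_imports; infer_instance

-- ===== CLAIM =====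
def Claim_equal_analyze_internal_ocr_imports : Prop := ∀ (imports : List (List (String × String))), Dom_analyze_internal_ocr_imports imports → Spec_analyze_internal_ocr_imports imports (analyze_internal_ocr_imports imports)

-- ===== LEMMAS AND PROOFS =====
-- A's loop body is `modify` at the key pvCategory computes.
theorem pv_step_eq (d : PySem.Dict String (List (List (String × String)))) (item : List (String × String)) :
    (let module := (PySem.Dict.mk item).getD "module" ""
     if PySem.Str.isIn "domains.detection.metrics" module || PySem.Str.isIn "domains.recognition.metrics" module then
       d.modify "domain_metrics" [] (· ++ [item])
     else if PySem.Str.isIn "domains.detection.evaluation" module then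
       d.modify "domain_evaluation" [] (· ++ [item])
     else if PySem.Str.isIn "core.evaluation" module then
       d.modify "core_evaluation" [] (· ++ [item])
     else if PySem.Str.isIn "core.lightning" module then
       d.modify "lightning_utils" [] (· ++ [item])
     else if PySem.Str.isIn "core.models" module then
       d.modify "model_components" [] (· ++ [item])
     else if PySem.Str.isIn "core.validation" module then
       d.modify "validation" [] (· ++ [item])
     else if PySem.Str.isIn "core.utils.registry" module then
       d.modify "registry" [] (· ++ [item])
     else
       d.modify "other_internal" [] (· ++ [item])) =
    d.modify (pvCategory ((PySem.Dict.mk item).getD "module" "")) [] (· ++ [item]) := by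
  simp only [pvCategory]
  split_ifs <;> rfl

-- ===== VERDICT =====
theorem analyze_internal_ocr_imports_spec : Claim_equal_analyze_internal_ocr_imports := by
  intro imports _
  unfold Spec_analyze_internal_ocr_imports analyze_internal_ocr_imports analyze_internal_ocr_imports_alt
  simp only [pv_step_eq]
  -- A's fold over items = a fold over B's tagged pair list
  have hfold :
      imports.foldl (fun d item => d.modify (pvCategory ((PySem.Dict.mk item).getD "module" "")) [] (· ++ [item])) PySem.Dict.empty =
      (imports.map (fun item => (pvCategory ((PySem.Dict.mk item).getD "module" ""), item))).foldl
        (fun d p => d.modify p.1 [] (· ++ [p.2])) PySem.Dict.empty := by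
    rw [List.foldl_map]
  rw [hfold]
  set tagged := imports.map (fun item => (pvCategory ((PySem.Dict.mk item).getD "module" ""), item)) with htag
  have hnd : (tagged.foldl (fun d p => d.modify p.1 [] (· ++ [p.2])) PySem.Dict.empty).keys.Nodup := by
    exact PySem.Dict.nodup_keys_foldl_modify_key tagged (fun p => p.1) [] (fun d p => (· ++ [p.2])) PySem.Dict.empty (by simp)
  rw [PySem.Dict.items_eq_map_keys _ hnd []]
  have hkeys : (tagged.foldl (fun d p => d.modify p.1 [] (· ++ [p.2])) PySem.Dict.empty).keys
      = PySem.Set.ofList (tagged.map (fun p => p.1)) := by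
    rw [PySem.Dict.keys_foldl_modify_key]
    rfl
  rw [hkeys]
  rw [PySem.List.dedup_eq_ofList]
  apply List.map_congr_left
  intro c _
  rw [PySem.Dict.getD_foldl_modify_append]
  simp [PySem.Dict.getD_empty]
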